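-- pv_equiv track=rewrite | github.com/Liuuuv/Rubiks-cube | rubikscube_calculs.py | mouvement_inverse
-- ===== SOURCE A (Python) =====
-- def mouvement_inverse(X):
--     if len(X) == 0:
--         return ""
--     elif len(X) == 1:
--         return X + "'"
--     else:
--         if X[1] == "'":
--             return mouvement_inverse(X[2:]) + X[:1]
--         else:
--             return mouvement_inverse(X[1:]) + X[0] + "'"
-- ===== SOURCE B (Python) =====
-- def mouvement_inverse(X):
--     # one-pass character state machine, no lookahead: 'pending' holds the move
--     # letter whose modifier is not yet known; join the inverted tokens reversed.
--     out = []
--     pending = None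
--     for c in X:
--         if c == "'" and pending is not None:
--             out.append(pending)          # X' inverts to X
--             pending = None
--         else:
--             if pending is not None:
--                 out.append(pending + "'")  # plain move inverts to move'
--             pending = c
--     if pending is not None:
--         out.append(pending + "'")
--     return "".join(reversed(out))
-- ===== Notes on version B (the rewrite author's own statement) =====
-- stated objective: faster
-- what changed: Replaces A's recursion-on-the-suffix with repeated O(n) string slicing/concatenation by a single forward character-by-character state machine (a 'pending move' register, no lookahead and no slicing) that emits inverted tokens into a list joined reversed once.
import Mathlib
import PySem

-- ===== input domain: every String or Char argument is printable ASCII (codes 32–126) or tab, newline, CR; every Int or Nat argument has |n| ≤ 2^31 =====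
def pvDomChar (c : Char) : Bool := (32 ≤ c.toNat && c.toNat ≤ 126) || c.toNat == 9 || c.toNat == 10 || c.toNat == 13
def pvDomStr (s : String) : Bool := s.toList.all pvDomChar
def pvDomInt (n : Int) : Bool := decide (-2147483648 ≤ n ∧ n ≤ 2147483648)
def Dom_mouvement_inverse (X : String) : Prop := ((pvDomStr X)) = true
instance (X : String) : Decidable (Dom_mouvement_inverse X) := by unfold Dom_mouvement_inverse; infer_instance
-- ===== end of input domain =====

-- B replaces A's O(n^2) recursive suffix-inversion by a single forward character state machine
-- (a pending-move register, no lookahead), emitting inverted tokens joined reversed once: O(n).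

-- ===== PORT A =====
-- A's recursion on the string, over its character list.
def mouvInvA : List Char → List Char
  | [] => []
  | [c] => [c, '\'']
  | c :: d :: rest =>
      if d = '\'' then mouvInvA rest ++ [c]
      else mouvInvA (d :: rest) ++ [c, '\'']

def mouvement_inverse (X : String) : String := String.ofList (mouvInvA X.toList)

-- ===== PORT B =====
-- B's for-loop body: state is (pending register, list of emitted inverted tokens).
def mouvInvStep : Option Char × List (List Char) → Char → Option Char × List (List Char)
  | (pending, out), c =>
      if c = '\'' ∧ pending.isSome then
        (none, out ++ [[pending.get!]])
      else
        match pending with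
        | some p => (some c, out ++ [[p, '\'']])
        | none => (some c, out)

-- B's final flush of the pending register.
def mouvInvFlush : Option Char × List (List Char) → List (List Char)
  | (some p, out) => out ++ [[p, '\'']]
  | (none, out) => out

def mouvement_inverse_alt (X : String) : String :=
  String.ofList ((mouvInvFlush (X.toList.foldl mouvInvStep (none, []))).reverse).flatten

-- ===== PRECONDITION & SPEC =====
def Spec_mouvement_inverse (X : String) (out : String) : Prop := out = mouvement_inverse_alt X
instance (X : String) (out : String) : Decidable (Spec_mouvement_inverse X out) := by unfold Spec_mouvement_inverse; infer_instance

-- ===== CLAIM (what is proved, stated in full; the proofs are below) =====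
def Claim_equal_mouvement_inverse : Prop := ∀ (X : String), Dom_mouvement_inverse X → Spec_mouvement_inverse X (mouvement_inverse X)

-- ===== LEMMAS AND PROOFS =====

-- tokens emitted so far only accumulate: the run from (p, out) is out ++ the run from (p, []).
theorem mouvInvRun_append (l : List Char) (p : Option Char) (out : List (List Char)) :
    mouvInvFlush (l.foldl mouvInvStep (p, out)) =
      out ++ mouvInvFlush (l.foldl mouvInvStep (p, [])) := by
  induction l generalizing p out with
  | nil => cases p <;> simp [mouvInvFlush]
  | cons c l ih =>
      by_cases h : c = '\'' ∧ p.isSome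
      · obtain ⟨hc, hp⟩ := h
        cases p with
        | none => simp at hp
        | some q =>
            simp [List.foldl, mouvInvStep, hc, ih none (out ++ [[q]]), ih none [[q]]]
      · cases p with
        | none =>
            have hs : mouvInvStep (none, out) c = (some c, out) := by
              simp [mouvInvStep]
            have hs0 : mouvInvStep ((none : Option Char), ([] : List (List Char))) c = (some c, []) := by
              simp [mouvInvStep]
            simp [List.foldl, hs, hs0, ih (some c) out]
        | some q =>
            have hc : ¬ c = '\'' := by
              intro hcc; exact h ⟨hcc, rfl⟩
            have hs : ∀ o, mouvInvStep (some q, o) c = (some c, o ++ [[q, '\'']]) := by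
              intro o; simp [mouvInvStep, hc]
            simp [List.foldl, hs, ih (some c) (out ++ [[q, '\'']]), ih (some c) [[q, '\'']]]

-- the flushed token list of B's run, characterised by A's recursion shape.
theorem mouvInvA_eq_machine (l : List Char) :
    mouvInvA l = ((mouvInvFlush (l.foldl mouvInvStep (none, []))).reverse).flatten := by
  induction l using mouvInvA.induct with
  | case1 => simp [mouvInvA, mouvInvFlush]
  | case2 c => simp [mouvInvA, mouvInvFlush, List.foldl, mouvInvStep]
  | case3 c rest ih =>
      have e1 : mouvInvStep ((none : Option Char), ([] : List (List Char))) c = (some c, []) := by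
        simp [mouvInvStep]
      have e2 : mouvInvStep (some c, ([] : List (List Char))) '\'' = (none, [[c]]) := by
        simp [mouvInvStep]
      have : mouvInvFlush ((c :: '\'' :: rest).foldl mouvInvStep (none, [])) =
          [[c]] ++ mouvInvFlush (rest.foldl mouvInvStep (none, [])) := by
        simp [List.foldl, e1, e2, mouvInvRun_append rest none [[c]]]
      rw [this]
      simp [mouvInvA, ih]
  | case4 c d rest h ih =>
      have e1 : mouvInvStep ((none : Option Char), ([] : List (List Char))) c = (some c, []) := by
        simp [mouvInvStep]
      have e2 : mouvInvStep (some c, ([] : List (List Char))) d = (some d, [[c, '\'']]) := by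
        simp [mouvInvStep, h]
      have e3 : mouvInvStep ((none : Option Char), ([] : List (List Char))) d = (some d, []) := by
        simp [mouvInvStep]
      have : mouvInvFlush ((c :: d :: rest).foldl mouvInvStep (none, [])) =
          [[c, '\'']] ++ mouvInvFlush ((d :: rest).foldl mouvInvStep (none, [])) := by
        simp [List.foldl, e1, e2, e3, mouvInvRun_append rest (some d) [[c, '\'']]]
      rw [this]
      simp [mouvInvA, h, ih]

-- ===== VERDICT (by name: the statement is the Claim_ definition above) =====
theorem mouvement_inverse_spec : Claim_equal_mouvement_inverse := by
  intro X _
  unfold Spec_mouvement_inverse mouvement_inverse mouvement_inverse_alt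
  rw [mouvInvA_eq_machine]
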